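-- pv_equiv track=rewrite | github.com/RandumbWilliam/test-python | test02.py | basic_variables
-- ===== SOURCE A (Python) =====
-- def basic_variables(new_number_variables, lhs_constraints, rhs_constraints):
--     # STEP-3: Find Basic Variables
--     # Transpose the array
--     transposed_array = list(map(list, zip(*lhs_constraints)))
--     # Initialize lists to store the indices of basic variables and their corresponding row indices
--     basic_vars = []
--     basic_var_rows = []
--     basic_variables = []
--     def exist(target, arr):
--         for i in range(len(arr)):
--             if arr[i]["row"] == target:
--                 return i
--
--         return None
--     # Loop through each row of the transposed array
--     for i, row in enumerate(transposed_array):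
--         # Count the number of non-zero values in the row
--         num_nonzero = sum(val != 0 for val in row)
--         # If there is only one non-zero value, add the index to the list of basic variables
--         # and append the row index to the list of corresponding row indices
--         if num_nonzero == 1:
--             row_index = row.index(next(val for val in row if val != 0))
--             exist_index = exist(row_index, basic_variables)
--             if exist_index is not None:
--                 basic_variables[exist_index] = {"row": row_index, "col": i}
--             else:
--                 basic_variables.append({"row": row_index, "col": i})
--
--             basic_vars.append(i)
--             basic_var_rows.append(row.index(next(val for val in row if val != 0)))
--
--     # Current Variables
--     curr_variables = [0] * new_number_variables
--     for x in basic_variables: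
--         curr_variables[x["col"]] = rhs_constraints[x["row"]]
--
--     return curr_variables
-- ===== SOURCE B (Python) =====
-- def basic_variables(new_number_variables, lhs_constraints, rhs_constraints):
--     # Single row-major pass: no transpose, no per-column rescans, no list-of-dicts upsert.
--     width = min(len(row) for row in lhs_constraints) if lhs_constraints else 0
--     count = [0] * width    # nonzeros seen so far in each column
--     first = [0] * width    # row of the first nonzero in each column
--     for r, row in enumerate(lhs_constraints):
--         first = [r if (row[c] != 0 and count[c] == 0) else first[c] for c in range(width)]
--         count = [count[c] + (1 if row[c] != 0 else 0) for c in range(width)]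
--     mapping = {}
--     for c in range(width):
--         if count[c] == 1:
--             mapping[first[c]] = c   # a later basic column for the same row overwrites
--     curr_variables = [0] * new_number_variables
--     for r, c in mapping.items():
--         curr_variables[c] = rhs_constraints[r]
--     return curr_variables
-- ===== Notes on version B (the rewrite author's own statement) =====
-- stated objective: alternative
-- what changed: B drops A's transpose and per-column list-of-dicts upsert (with its linear 'exist' scan): one row-major pass accumulates per-column nonzero counts and first-nonzero rows, then a plain dict keyed by row (later columns overwrite) yields the solution vector.
import Mathlib
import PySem

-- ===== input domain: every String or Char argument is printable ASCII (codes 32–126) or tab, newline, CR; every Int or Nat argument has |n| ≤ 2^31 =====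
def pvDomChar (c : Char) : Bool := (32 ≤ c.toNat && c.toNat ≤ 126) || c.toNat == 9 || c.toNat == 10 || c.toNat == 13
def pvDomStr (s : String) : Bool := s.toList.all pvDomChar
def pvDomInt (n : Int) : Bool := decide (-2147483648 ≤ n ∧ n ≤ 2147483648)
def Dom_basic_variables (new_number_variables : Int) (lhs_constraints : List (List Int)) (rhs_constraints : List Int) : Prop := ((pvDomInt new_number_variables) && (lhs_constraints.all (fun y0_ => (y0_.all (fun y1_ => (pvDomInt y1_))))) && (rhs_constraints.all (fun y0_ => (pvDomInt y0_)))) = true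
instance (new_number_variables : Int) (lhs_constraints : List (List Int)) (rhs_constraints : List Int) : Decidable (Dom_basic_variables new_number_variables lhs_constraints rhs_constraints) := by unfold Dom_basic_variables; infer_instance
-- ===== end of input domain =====

-- B replaces A's transpose + list-of-dicts upsert (with its linear exist() scan) by one
-- row-major pass accumulating per-column nonzero counts / first-nonzero rows and a dict
-- keyed by row; objective: alternative decomposition, same exact return value.

-- ===== PORT A =====
-- min row length: zip(*lhs) truncates to the shortest row
def pyMinLen (xss : List (List Int)) : Nat :=
  match xss with
  | [] => 0
  | x :: xs => xs.foldl (fun m r => min m r.length) x.length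

-- column c of lhs (entries exist for c < pyMinLen lhs; getD default unreachable there)
def colOf (lhs : List (List Int)) (c : Nat) : List Int :=
  lhs.map (fun row => row.getD c 0)

-- list(map(list, zip(*lhs_constraints)))
def pyZipStar (lhs : List (List Int)) : List (List Int) :=
  (List.range (pyMinLen lhs)).map (colOf lhs)

-- the nested `exist`/replace-or-append on the basic_variables list of {"row","col"} records
def bvUpsert (basics : List (Nat × Nat)) (r c : Nat) : List (Nat × Nat) :=
  match basics.findIdx? (fun x => x.1 = r) with
  | some j => basics.set j (r, c)
  | none => basics ++ [(r, c)]

-- one iteration of A's `for i, row in enumerate(transposed_array)` loop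
def stepA (transposed : List (List Int)) (st : List Nat × List Nat × List (Nat × Nat)) (i : Nat) :
    List Nat × List Nat × List (Nat × Nat) :=
  let row := transposed.getD i []
  let numNonzero := row.countP (fun v => decide (v ≠ 0))
  if numNonzero = 1 then
    let rowIndex := row.findIdx (fun v => decide (v ≠ 0))
    (st.1 ++ [i], st.2.1 ++ [rowIndex], bvUpsert st.2.2 rowIndex i)
  else st

def basic_variables (new_number_variables : Int) (lhs_constraints : List (List Int)) (rhs_constraints : List Int) : List Int :=
  let transposed := pyZipStar lhs_constraints
  let res := (List.range transposed.length).foldl (stepA transposed) ([], [], [])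
  -- curr_variables = [0]*n; curr_variables[x["col"]] = rhs_constraints[x["row"]]
  res.2.2.foldl (fun curr x => curr.set x.2 (rhs_constraints.getD x.1 0))
    (List.replicate new_number_variables.toNat 0)

-- ===== PORT B =====
-- width = min(len(row) for row in lhs_constraints) if lhs_constraints else 0
def bvWidth (lhs : List (List Int)) : Nat :=
  match lhs with
  | [] => 0
  | x :: xs => xs.foldl (fun m r => min m r.length) x.length

-- one iteration of Source B's row loop: state = (r, count, first)
def stepB (width : Nat) (st : Nat × List Nat × List Nat) (row : List Int) :
    Nat × List Nat × List Nat :=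
  let r := st.1
  let count := st.2.1
  let first := st.2.2
  let first' := (List.range width).map
    (fun c => if row.getD c 0 ≠ 0 ∧ count.getD c 0 = 0 then r else first.getD c 0)
  let count' := (List.range width).map
    (fun c => count.getD c 0 + (if row.getD c 0 ≠ 0 then 1 else 0))
  (r + 1, count', first')

def basic_variables_alt (new_number_variables : Int) (lhs_constraints : List (List Int)) (rhs_constraints : List Int) : List Int :=
  let width := bvWidth lhs_constraints
  let cf := lhs_constraints.foldl (stepB width)
    (0, List.replicate width 0, List.replicate width 0)
  let mapping := (List.range width).foldl
    (fun (d : PySem.Dict Nat Nat) c =>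
      if cf.2.1.getD c 0 = 1 then d.insert (cf.2.2.getD c 0) c else d)
    PySem.Dict.empty
  mapping.items.foldl (fun curr x => curr.set x.2 (rhs_constraints.getD x.1 0))
    (List.replicate new_number_variables.toNat 0)

-- ===== PRECONDITION & SPEC =====
-- A raises IndexError when some basic column's index reaches past [0]*n or its nonzero's
-- row reaches past rhs_constraints; Pre_ admits exactly the inputs where A returns.
def Pre_basic_variables (new_number_variables : Int) (lhs_constraints : List (List Int)) (rhs_constraints : List Int) : Prop :=
  ∀ c ∈ List.range (((lhs_constraints.map List.length).min?).getD 0),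
    lhs_constraints.countP (fun row => decide (row.getD c 0 ≠ 0)) = 1 →
      ((c : Int) < new_number_variables ∧
        ∀ r ∈ List.range lhs_constraints.length,
          (lhs_constraints.getD r []).getD c 0 ≠ 0 → r < rhs_constraints.length)
instance (new_number_variables : Int) (lhs_constraints : List (List Int)) (rhs_constraints : List Int) : Decidable (Pre_basic_variables new_number_variables lhs_constraints rhs_constraints) := by unfold Pre_basic_variables; infer_instance

def pvWitness_basic_variables : Int × List (List Int) × List Int :=
  (3, [[1, 0, 2], [0, 5, 0]], [7, 9])

def Spec_basic_variables (new_number_variables : Int) (lhs_constraints : List (List Int)) (rhs_constraints : List Int) (out : List Int) : Prop := out = basic_variables_alt new_number_variables lhs_constraints rhs_constraints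
instance (new_number_variables : Int) (lhs_constraints : List (List Int)) (rhs_constraints : List Int) (out : List Int) : Decidable (Spec_basic_variables new_number_variables lhs_constraints rhs_constraints out) := by unfold Spec_basic_variables; infer_instance

-- ===== CLAIM (what is proved, stated in full; the proofs are below) =====
def Claim_equal_basic_variables : Prop := ∀ (new_number_variables : Int) (lhs_constraints : List (List Int)) (rhs_constraints : List Int), Dom_basic_variables new_number_variables lhs_constraints rhs_constraints → Pre_basic_variables new_number_variables lhs_constraints rhs_constraints → Spec_basic_variables new_number_variables lhs_constraints rhs_constraints (basic_variables new_number_variables lhs_constraints rhs_constraints)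

-- ===== LEMMAS AND PROOFS =====

theorem bvWidth_eq_pyMinLen (lhs : List (List Int)) : bvWidth lhs = pyMinLen lhs := rfl

theorem getD_map_range' {α : Type} (f : Nat → α) (w c : Nat) (d : α) (h : c < w) :
    ((List.range w).map f).getD c d = f c :=
  PySem.List.getD_map_range f w c d h

theorem bvUpsert_eq_some (l : List (Nat × Nat)) (r c j : Nat)
    (h : List.findIdx? (fun x => decide (x.1 = r)) l = some j) :
    bvUpsert l r c = l.set j (r, c) := by
  unfold bvUpsert
  rw [h]

theorem bvUpsert_eq_none (l : List (Nat × Nat)) (r c : Nat)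
    (h : List.findIdx? (fun x => decide (x.1 = r)) l = none) :
    bvUpsert l r c = l ++ [(r, c)] := by
  unfold bvUpsert
  rw [h]

-- A's fold, projected to its basic_variables component
theorem foldA_proj (t : List (List Int)) (l : List Nat) (init : List Nat × List Nat × List (Nat × Nat)) :
    (l.foldl (stepA t) init).2.2 =
      l.foldl (fun b i =>
        if (t.getD i []).countP (fun v => decide (v ≠ 0)) = 1 then
          bvUpsert b ((t.getD i []).findIdx (fun v => decide (v ≠ 0))) i
        else b) init.2.2 := by
  induction l generalizing init with
  | nil => rfl
  | cons i l ih =>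
      simp only [List.foldl_cons, ih, stepA]
      split <;> rfl

theorem getD_pyZipStar (lhs : List (List Int)) (i : Nat) (h : i < pyMinLen lhs) :
    (pyZipStar lhs).getD i [] = colOf lhs i := by
  unfold pyZipStar
  exact getD_map_range' (colOf lhs) _ i [] h

theorem length_pyZipStar (lhs : List (List Int)) : (pyZipStar lhs).length = pyMinLen lhs := by
  simp [pyZipStar]

theorem countP_colOf_zero_iff (lhs : List (List Int)) (c : Nat) :
    (colOf lhs c).countP (fun v => decide (v ≠ 0)) = 0 ↔
      (colOf lhs c).any (fun v => decide (v ≠ 0)) = false := by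
  rw [List.countP_eq_zero]
  simp [List.any_eq_false]

-- B's row loop computes, per column, the nonzero count and the first nonzero row
theorem cf_spec (width : Nat) (lhs : List (List Int)) :
    lhs.foldl (stepB width) (0, List.replicate width 0, List.replicate width 0) =
      (lhs.length,
       (List.range width).map (fun c => (colOf lhs c).countP (fun v => decide (v ≠ 0))),
       (List.range width).map (fun c =>
         if (colOf lhs c).any (fun v => decide (v ≠ 0)) then
           (colOf lhs c).findIdx (fun v => decide (v ≠ 0))
         else 0)) := by
  induction lhs using List.reverseRecOn with
  | nil =>
      have h1 : (List.range width).map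
          (fun c => (colOf ([] : List (List Int)) c).countP (fun v => decide (v ≠ 0))) =
          List.replicate width 0 := by
        rw [List.eq_replicate_iff]
        refine ⟨by simp, ?_⟩
        intro b hb
        simp only [List.mem_map] at hb
        obtain ⟨a, _, hab⟩ := hb
        simp [colOf] at hab
        omega
      have h2 : (List.range width).map
          (fun c => if (colOf ([] : List (List Int)) c).any (fun v => decide (v ≠ 0)) then
            (colOf ([] : List (List Int)) c).findIdx (fun v => decide (v ≠ 0)) else 0) =
          List.replicate width 0 := by
        rw [List.eq_replicate_iff]
        refine ⟨by simp, ?_⟩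
        intro b hb
        simp only [List.mem_map] at hb
        obtain ⟨a, _, hab⟩ := hb
        simp [colOf] at hab
        omega
      rw [List.foldl_nil, h1, h2]
      rfl
  | append_singleton lhs row ih =>
      rw [List.foldl_append, ih, List.foldl_cons, List.foldl_nil]
      unfold stepB
      simp only
      have hcol : ∀ c, colOf (lhs ++ [row]) c = colOf lhs c ++ [row[c]?.getD 0] := by
        intro c; simp [colOf]
      refine Prod.ext (by simp) (Prod.ext ?_ ?_) <;> simp only
      · apply List.map_congr_left
        intro c hc
        have hc' := List.mem_range.mp hc
        rw [getD_map_range' _ _ _ _ hc', hcol c, List.countP_append]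
        by_cases hx : row[c]?.getD 0 = 0 <;>
          simp [List.getD_eq_getElem?_getD, hx]
      · apply List.map_congr_left
        intro c hc
        have hc' := List.mem_range.mp hc
        rw [getD_map_range' _ _ _ _ hc', getD_map_range' _ _ _ _ hc', hcol c]
        by_cases hany : (colOf lhs c).any (fun v => decide (v ≠ 0))
        · have hcnt : (colOf lhs c).countP (fun v => decide (v ≠ 0)) ≠ 0 := by
            rw [Ne, countP_colOf_zero_iff]
            intro hf
            rw [hany] at hf
            simp at hf
          obtain ⟨x, hxmem, hxp⟩ := List.any_eq_true.mp hany
          have hlt := List.findIdx_lt_length_of_exists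
            (p := fun v => decide (v ≠ 0)) (xs := colOf lhs c) ⟨x, hxmem, hxp⟩
          rw [if_neg (fun h => hcnt h.2), List.any_append, hany]
          simp only [Bool.true_or, if_true]
          rw [List.findIdx_append, if_pos hlt]
        · have hanyf : (colOf lhs c).any (fun v => decide (v ≠ 0)) = false :=
            Bool.eq_false_iff.mpr hany
          have hcnt : (colOf lhs c).countP (fun v => decide (v ≠ 0)) = 0 :=
            (countP_colOf_zero_iff lhs c).mpr hanyf
          rw [List.any_append, hanyf, Bool.false_or]
          by_cases hx : row[c]?.getD 0 = 0
          · have hxf : ([row[c]?.getD 0].any fun v => decide (v ≠ 0)) = false := by simp [hx]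
            rw [hxf]
            simp [hx]
          · have hxany : ([row[c]?.getD 0].any fun v => decide (v ≠ 0)) = true := by simpa using hx
            rw [if_pos ⟨hx, hcnt⟩, hxany]
            simp only [if_true]
            have hnotlt : ¬ (colOf lhs c).findIdx (fun v => decide (v ≠ 0)) < (colOf lhs c).length := by
              intro hlt
              have := List.findIdx_getElem (p := fun v => decide (v ≠ 0)) (xs := colOf lhs c) (w := hlt)
              exact hany (List.any_eq_true.mpr ⟨_, List.getElem_mem hlt, this⟩)
            rw [List.findIdx_append, if_neg hnotlt]
            have hlen : (colOf lhs c).length = lhs.length := by simp [colOf]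
            have h0 : List.findIdx (fun v => decide (v ≠ 0)) [row[c]?.getD 0] = 0 := by
              simp [List.findIdx_cons, hx]
            omega

-- A's replace-or-append equals the map/append description used by Dict.insert
theorem upsert_eq_items (l : List (Nat × Nat)) (r c : Nat) (h : (l.map Prod.fst).Nodup) :
    bvUpsert l r c =
      if l.any (fun p => decide (p.1 = r)) then l.map (fun p => if p.1 = r then (r, c) else p)
      else l ++ [(r, c)] := by
  induction l with
  | nil => simp [bvUpsert]
  | cons p l ih =>
      rw [List.map_cons, List.nodup_cons] at h
      have ih' := ih h.2
      by_cases hp : p.1 = r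
      · have hfi : List.findIdx? (fun x => decide (x.1 = r)) (p :: l) = some 0 := by
          simp [List.findIdx?_cons, hp]
        have hany : ((p :: l).any fun q => decide (q.1 = r)) = true := by simp [hp]
        rw [bvUpsert_eq_some _ _ _ _ hfi, if_pos hany, List.set_cons_zero,
            List.map_cons, if_pos hp]
        have hnone : ∀ q ∈ l, ¬ q.1 = r := by
          intro q hq hqr
          exact h.1 (by rw [hp, ← hqr]; exact List.mem_map_of_mem hq)
        have hmap : List.map (fun q => if q.1 = r then (r, c) else q) l = l := by
          conv_rhs => rw [← List.map_id l]
          exact List.map_congr_left (fun q hq => by simp [hnone q hq])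
        rw [hmap]
      · have hd : (decide (p.1 = r)) = false := decide_eq_false hp
        have hstep : List.findIdx? (fun x => decide (x.1 = r)) (p :: l) =
            (List.findIdx? (fun x => decide (x.1 = r)) l).map (· + 1) := by
          rw [List.findIdx?_cons, hd]
          simp
        rcases hfi : List.findIdx? (fun x => decide (x.1 = r)) l with _ | j
        · have hnone := List.findIdx?_eq_none_iff.mp hfi
          have hlany : (l.any fun q => decide (q.1 = r)) = false := by
            simp only [List.any_eq_false]
            intro q hq
            simpa using hnone q hq
          have hcany : ((p :: l).any fun q => decide (q.1 = r)) = false := by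
            simp [List.any_cons, hlany, hd]
          rw [bvUpsert_eq_none _ _ _ (by rw [hstep, hfi]; rfl),
              if_neg (by simp [hcany])]
        · have hlany : (l.any fun q => decide (q.1 = r)) = true := by
            rcases List.findIdx?_eq_some_iff_getElem.mp hfi with ⟨hlt, hpj, _⟩
            exact List.any_eq_true.mpr ⟨l[j], List.getElem_mem hlt, hpj⟩
          have hcany : ((p :: l).any fun q => decide (q.1 = r)) = true := by
            simp [List.any_cons, hlany]
          rw [bvUpsert_eq_some _ _ _ _ (by rw [hstep, hfi]; rfl),
              if_pos hcany, List.set_cons_succ, List.map_cons, if_neg hp]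
          rw [bvUpsert_eq_some _ _ _ _ hfi, if_pos hlany] at ih'
          rw [ih']

-- bvUpsert on a dict's items is Dict.insert
theorem upsert_items (d : PySem.Dict Nat Nat) (r c : Nat) (h : d.keys.Nodup) :
    bvUpsert d.items r c = (d.insert r c).items := by
  rw [upsert_eq_items d.items r c (by simpa [PySem.Dict.keys] using h)]
  rw [PySem.Dict.items_insert]
  have hcontains : d.contains r = d.items.any (fun p => decide (p.1 = r)) := by
    rw [PySem.Dict.contains_eq_decide_mem_keys]
    by_cases hm : ∃ p ∈ d.items, p.1 = r
    · obtain ⟨p, hp, hpr⟩ := hm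
      rw [decide_eq_true (show r ∈ d.keys by
            simp only [PySem.Dict.keys, List.mem_map]
            exact ⟨p, hp, hpr⟩)]
      exact (List.any_eq_true.mpr ⟨p, hp, by simpa using hpr⟩).symm
    · rw [decide_eq_false (show ¬ r ∈ d.keys by
            simp only [PySem.Dict.keys, List.mem_map]
            intro ⟨p, hp, hpr⟩
            exact hm ⟨p, hp, hpr⟩)]
      symm
      simp only [List.any_eq_false]
      intro p hp
      by_contra hc
      simp only [decide_eq_true_eq] at hc
      exact hm ⟨p, hp, hc⟩
  rw [hcontains]
  by_cases hany : d.items.any (fun p => decide (p.1 = r)) = true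
  · rw [hany, if_pos rfl, if_pos rfl]
    apply List.map_congr_left
    intro p _
    by_cases hpr : p.1 = r <;> simp [hpr]
  · have hf := Bool.eq_false_iff.mpr hany
    rw [hf, if_neg (by simp), if_neg (by simp)]

-- A's upsert loop produces exactly the items of B's dict loop
theorem fold_upsert_eq_dict (P : Nat → Prop) [DecidablePred P] (R : Nat → Nat) (l : List Nat)
    (d : PySem.Dict Nat Nat) (h : d.keys.Nodup) :
    l.foldl (fun b i => if P i then bvUpsert b (R i) i else b) d.items =
      (l.foldl (fun d i => if P i then d.insert (R i) i else d) d).items := by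
  induction l generalizing d with
  | nil => rfl
  | cons i l ih =>
      simp only [List.foldl_cons]
      by_cases hp : P i
      · rw [if_pos hp, if_pos hp, upsert_items d (R i) i h]
        exact ih _ (PySem.Dict.nodup_keys_insert _ _ _ h)
      · rw [if_neg hp, if_neg hp]
        exact ih _ h

-- main unconditional equality of the two ports
theorem ports_agree (n : Int) (lhs : List (List Int)) (rhs : List Int) :
    basic_variables n lhs rhs = basic_variables_alt n lhs rhs := by
  unfold basic_variables basic_variables_alt
  simp only
  rw [bvWidth_eq_pyMinLen, cf_spec, length_pyZipStar]
  set w := pyMinLen lhs with hw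
  congr 1
  rw [foldA_proj]
  simp only
  have hA : (List.range w).foldl
      (fun b i =>
        if ((pyZipStar lhs).getD i []).countP (fun v => decide (v ≠ 0)) = 1 then
          bvUpsert b (((pyZipStar lhs).getD i []).findIdx (fun v => decide (v ≠ 0))) i
        else b) [] =
      (List.range w).foldl
      (fun b i =>
        if (colOf lhs i).countP (fun v => decide (v ≠ 0)) = 1 then
          bvUpsert b ((colOf lhs i).findIdx (fun v => decide (v ≠ 0))) i
        else b) [] := by
    apply PySem.List.foldl_congr_mem
    intro b i hi
    rw [getD_pyZipStar lhs i (List.mem_range.mp hi)]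
  rw [hA]
  have hB : (List.range w).foldl
        (fun (d : PySem.Dict Nat Nat) c =>
          if ((List.range w).map (fun c => (colOf lhs c).countP (fun v => decide (v ≠ 0)))).getD c 0 = 1 then
            d.insert (((List.range w).map (fun c =>
              if (colOf lhs c).any (fun v => decide (v ≠ 0)) then
                (colOf lhs c).findIdx (fun v => decide (v ≠ 0))
              else 0)).getD c 0) c
          else d) PySem.Dict.empty =
      (List.range w).foldl
        (fun (d : PySem.Dict Nat Nat) c =>
          if (colOf lhs c).countP (fun v => decide (v ≠ 0)) = 1 then
            d.insert ((colOf lhs c).findIdx (fun v => decide (v ≠ 0))) c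
          else d) PySem.Dict.empty := by
    apply PySem.List.foldl_congr_mem
    intro d c hc
    have hc' := List.mem_range.mp hc
    rw [getD_map_range' _ _ _ _ hc', getD_map_range' _ _ _ _ hc']
    by_cases h1 : (colOf lhs c).countP (fun v => decide (v ≠ 0)) = 1
    · rw [if_pos h1, if_pos h1]
      have hany : (colOf lhs c).any (fun v => decide (v ≠ 0)) = true := by
        by_contra hno
        have := (countP_colOf_zero_iff lhs c).mpr (Bool.eq_false_iff.mpr hno)
        omega
      rw [if_pos hany]
    · rw [if_neg h1, if_neg h1]
  rw [hB]
  exact fold_upsert_eq_dict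
    (fun c => (colOf lhs c).countP (fun v => decide (v ≠ 0)) = 1)
    (fun c => (colOf lhs c).findIdx (fun v => decide (v ≠ 0)))
    (List.range w) PySem.Dict.empty PySem.Dict.nodup_keys_empty

-- ===== VERDICT (by name: the statement is the Claim_ definition above) =====
theorem basic_variables_spec : Claim_equal_basic_variables := by
  intro n lhs rhs _ _
  unfold Spec_basic_variables
  exact ports_agree n lhs rhs
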